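-- pv_equiv track=rewrite | github.com/Jaagss/Math-Assigment-1 | MATHS_ASSIGNMENT.py | echelon_check
-- ===== SOURCE A (Python) =====
-- def echelon_check(matrix):
--     index = []
--     for i in matrix:
--         for j in i:
--             if j != 0:
--                 index.append(i.index(j))
--                 break
--
--     index.sort()
--     new = []
--     for i in index:
--         if i not in new:
--             new.append(i)
--
--     if len(new) != len(index):
--         return False
--     else:
--         return True
-- ===== SOURCE B (Python) =====
-- def echelon_check(matrix):
--     # Single pass: record each row's pivot column (index of first nonzero entry)
--     # in a set; fail fast on the first repeated pivot column.
--     seen = set()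
--     for row in matrix:
--         pivot = None
--         for idx, val in enumerate(row):
--             if val != 0:
--                 pivot = idx
--                 break
--         if pivot is None:
--             continue
--         if pivot in seen:
--             return False
--         seen.add(pivot)
--     return True
-- ===== Notes on version B (the rewrite author's own statement) =====
-- stated objective: simpler
-- what changed: B fuses pivot-finding and distinctness into one early-exiting pass over the rows with a set of seen pivot columns, dropping A's intermediate pivot list, its sort, its value-search i.index(j), and the separate dedup loop.
import Mathlib
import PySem

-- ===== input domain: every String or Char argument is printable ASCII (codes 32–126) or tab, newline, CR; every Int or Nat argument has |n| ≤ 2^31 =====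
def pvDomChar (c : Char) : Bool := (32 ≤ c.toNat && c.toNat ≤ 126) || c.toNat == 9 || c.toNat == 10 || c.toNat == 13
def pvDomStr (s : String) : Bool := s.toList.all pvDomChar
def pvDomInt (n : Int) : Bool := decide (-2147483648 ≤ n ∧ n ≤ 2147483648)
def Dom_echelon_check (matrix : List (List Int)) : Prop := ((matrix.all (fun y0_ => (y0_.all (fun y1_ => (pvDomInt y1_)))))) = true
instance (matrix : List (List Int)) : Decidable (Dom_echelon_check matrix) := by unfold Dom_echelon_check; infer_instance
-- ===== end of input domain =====

-- B replaces A's pivot list + sort + dedup loop by one early-exiting pass with a set of seen pivot columns (objective: simpler).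

-- ===== PORT A =====
-- inner loop 'for j in i: if j != 0: index.append(i.index(j)); break': returns the appended value, if any.
-- i.index(j) never raises here (j was read from i), so index? is always some; 'none' is only the no-break case.
def pvFirstA (orig : List Int) : List Int → Option Nat
  | [] => none
  | j :: t => if j ≠ 0 then PySem.List.index? orig j else pvFirstA orig t

def echelon_check (matrix : List (List Int)) : Bool :=
  let index := matrix.foldl (fun acc i =>
    match pvFirstA i i with
    | some k => acc ++ [k]
    | none => acc) ([] : List Nat)
  let index := PySem.List.sorted index (fun x => x) false
  let new := index.foldl (fun new i => if new.contains i then new else new ++ [i]) ([] : List Nat)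
  if new.length ≠ index.length then false else true

-- ===== PORT B =====
-- 'for idx, val in enumerate(row): if val != 0: pivot = idx; break'
def pvPivotB : List Int → Nat → Option Nat
  | [], _ => none
  | v :: t, idx => if v ≠ 0 then some idx else pvPivotB t (idx + 1)

-- the early-exiting row loop carrying the set 'seen'
def pvGoB : List (List Int) → PySem.Set Nat → Bool
  | [], _ => true
  | row :: rest, seen =>
    match pvPivotB row 0 with
    | none => pvGoB rest seen
    | some p => if seen.contains p then false else pvGoB rest (PySem.Set.add seen p)

def echelon_check_alt (matrix : List (List Int)) : Bool := pvGoB matrix PySem.Set.empty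

-- ===== PRECONDITION & SPEC =====
def Spec_echelon_check (matrix : List (List Int)) (out : Bool) : Prop := out = echelon_check_alt matrix
instance (matrix : List (List Int)) (out : Bool) : Decidable (Spec_echelon_check matrix out) := by unfold Spec_echelon_check; infer_instance

-- ===== CLAIM (what is proved, stated in full; the proofs are below) =====
def Claim_equal_echelon_check : Prop := ∀ (matrix : List (List Int)), Dom_echelon_check matrix → Spec_echelon_check matrix (echelon_check matrix)

-- ===== LEMMAS AND PROOFS =====

-- the list of pivot columns, one per row that has a nonzero entry
def pvPivots (matrix : List (List Int)) : List Nat := matrix.filterMap (fun r => pvPivotB r 0)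

-- A's value-search i.index(j) finds the position of the first nonzero entry
theorem pvFirstA_eq_pivotB (rest pre : List Int) (hz : ∀ x ∈ pre, x = 0) :
    pvFirstA (pre ++ rest) rest = pvPivotB rest pre.length := by
  induction rest generalizing pre with
  | nil => rfl
  | cons j t ih =>
    by_cases hj : j = 0
    · subst hj
      have h := ih (pre ++ [0]) (by intro x hx; rcases List.mem_append.1 hx with h | h
                                    · exact hz x h
                                    · simpa using h)
      simp only [pvFirstA, pvPivotB, ne_eq, not_true_eq_false, if_false]
      simpa using h
    · simp only [pvFirstA, pvPivotB, ne_eq, hj, not_false_eq_true, if_true]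
      have hnm : j ∉ pre := fun hm => hj (hz j hm)
      exact (PySem.List.index?_eq_some_iff _ _ _).2 ⟨pre, t, rfl, rfl, hnm⟩

theorem pvFoldA_eq_pivots (matrix : List (List Int)) (acc : List Nat) :
    matrix.foldl (fun acc i =>
      match pvFirstA i i with
      | some k => acc ++ [k]
      | none => acc) acc = acc ++ pvPivots matrix := by
  induction matrix generalizing acc with
  | nil => simp [pvPivots]
  | cons r m ih =>
    have hr : pvFirstA r r = pvPivotB r 0 := pvFirstA_eq_pivotB r [] (by simp)
    simp only [List.foldl_cons, hr, pvPivots, List.filterMap_cons]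
    cases pvPivotB r 0 with
    | none => simpa [pvPivots] using ih acc
    | some k => simpa [pvPivots] using ih (acc ++ [k])

-- A's dedup loop: the fold keeps length iff the scanned list is duplicate-free and misses the accumulator
theorem pvDedup_len_le (xs acc : List Nat) :
    (xs.foldl (fun new i => if i ∈ new then new else new ++ [i]) acc).length
      ≤ acc.length + xs.length := by
  induction xs generalizing acc with
  | nil => simp
  | cons x t ih =>
    by_cases hc : x ∈ acc
    · simp only [List.foldl_cons, if_pos hc, List.length_cons]
      have := ih acc; omega
    · simp only [List.foldl_cons, if_neg hc, List.length_cons]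
      have := ih (acc ++ [x]); simp at this; omega

theorem pvDedup_len_eq_iff (xs acc : List Nat) :
    (xs.foldl (fun new i => if i ∈ new then new else new ++ [i]) acc).length
      = acc.length + xs.length ↔ xs.Nodup ∧ ∀ x ∈ xs, x ∉ acc := by
  induction xs generalizing acc with
  | nil => simp
  | cons x t ih =>
    simp only [List.nodup_cons]
    by_cases hc : x ∈ acc
    · simp only [List.foldl_cons, if_pos hc, List.length_cons]
      constructor
      · intro h; have := pvDedup_len_le t acc; omega
      · rintro ⟨-, hall⟩; exact absurd hc (hall x (by simp))
    · simp only [List.foldl_cons, if_neg hc, List.length_cons]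
      rw [show acc.length + (t.length + 1) = (acc ++ [x]).length + t.length by simp; omega,
          ih (acc ++ [x])]
      constructor
      · rintro ⟨hnd, hall⟩
        refine ⟨⟨fun hxt => hall x hxt (by simp), hnd⟩, fun y hy hya => ?_⟩
        rcases List.mem_cons.1 hy with rfl | hyt
        · exact hc hya
        · exact hall y hyt (List.mem_append.2 (Or.inl hya))
      · rintro ⟨⟨hxt, hnd⟩, hall⟩
        refine ⟨hnd, fun y hyt hy => ?_⟩
        rcases List.mem_append.1 hy with hya | hys
        · exact hall y (List.mem_cons_of_mem _ hyt) hya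
        · have hyx : y = x := by simpa using hys
          subst hyx; exact hxt hyt

-- the tail of A (sort, dedup, length comparison) decides Nodup of the unsorted pivot list
theorem pvA_tail (s l : List Nat) (hperm : s.Perm l) :
    (if (s.foldl (fun new i => if i ∈ new then new else new ++ [i]) ([] : List Nat)).length
        ≠ s.length then false else true) = decide l.Nodup := by
  by_cases h : l.Nodup
  · have he : (s.foldl (fun new i => if i ∈ new then new else new ++ [i]) ([] : List Nat)).length
        = s.length := by
      simpa using (pvDedup_len_eq_iff s []).2 ⟨hperm.nodup_iff.2 h, by simp⟩
    simp [he, h]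
  · have he : (s.foldl (fun new i => if i ∈ new then new else new ++ [i]) ([] : List Nat)).length
        ≠ s.length := by
      intro heq
      exact h (hperm.nodup_iff.1 ((pvDedup_len_eq_iff s []).1 (by simpa using heq)).1)
    simp [he, h]

-- A computes: are the pivot columns pairwise distinct?
theorem echelon_check_eq_nodup (matrix : List (List Int)) :
    echelon_check matrix = decide (pvPivots matrix).Nodup := by
  unfold echelon_check
  rw [pvFoldA_eq_pivots matrix []]
  simp only [List.nil_append]
  rw [show (fun (new : List Nat) (i : Nat) => if new.contains i then new else new ++ [i])
        = (fun new i => if i ∈ new then new else new ++ [i]) from by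
      funext new i; simp]
  exact pvA_tail _ _ (PySem.List.sorted_perm _ _ _)

-- B computes the same predicate, threaded through the 'seen' set
theorem pvGoB_iff (rows : List (List Int)) (seen : PySem.Set Nat) :
    pvGoB rows seen = true ↔ (pvPivots rows).Nodup ∧ ∀ p ∈ pvPivots rows, p ∉ seen := by
  induction rows generalizing seen with
  | nil => simp [pvGoB, pvPivots]
  | cons row rest ih =>
    simp only [pvGoB, pvPivots, List.filterMap_cons]
    cases hp : pvPivotB row 0 with
    | none => simpa [pvPivots] using ih seen
    | some p =>
      simp only [List.nodup_cons]
      by_cases hc : seen.contains p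
      · have hpm : p ∈ seen := by simpa using hc
        simp only [if_pos hc]
        constructor
        · intro h; cases h
        · rintro ⟨-, hall⟩; exact absurd hpm (hall p (by simp))
      · have hpm : p ∉ seen := by simpa using hc
        simp only [if_neg hc]
        rw [ih]
        constructor
        · rintro ⟨hnd, hall⟩
          refine ⟨⟨fun hpt => hall p hpt
              (show p ∈ PySem.Set.add seen p by simp [PySem.Set.mem_add]), hnd⟩,
            fun q hq hqs => ?_⟩
          rcases List.mem_cons.1 hq with rfl | hqt
          · exact hpm hqs
          · exact hall q hqt
              (show q ∈ PySem.Set.add seen p by simp [PySem.Set.mem_add, hqs])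
        · rintro ⟨⟨hpt, hnd⟩, hall⟩
          refine ⟨hnd, fun q hqt hq => ?_⟩
          rw [PySem.Set.mem_add] at hq
          rcases hq with hqs | rfl
          · exact hall q (List.mem_cons_of_mem _ hqt) hqs
          · exact hpt hqt

theorem echelon_check_alt_eq_nodup (matrix : List (List Int)) :
    echelon_check_alt matrix = decide (pvPivots matrix).Nodup := by
  have h := pvGoB_iff matrix PySem.Set.empty
  have hempty : ∀ p : Nat, p ∉ (PySem.Set.empty : PySem.Set Nat) := by
    simp [PySem.Set.empty]
  unfold echelon_check_alt
  by_cases hnd : (pvPivots matrix).Nodup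
  · rw [h.2 ⟨hnd, fun p _ => hempty p⟩]; simp [hnd]
  · have hb : pvGoB matrix PySem.Set.empty = false := by
      cases hE : pvGoB matrix PySem.Set.empty
      · rfl
      · exact absurd (h.1 hE).1 hnd
    rw [hb]; simp [hnd]

-- ===== VERDICT (by name: the statement is the Claim_ definition above) =====
theorem echelon_check_spec : Claim_equal_echelon_check := by
  intro matrix _
  unfold Spec_echelon_check
  rw [echelon_check_eq_nodup, echelon_check_alt_eq_nodup]
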